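-- pv_equiv track=rewrite | github.com/theredbluepill/arc-interactive | scripts/registry_rk_jw_gif.py | _rk_slide
-- ===== SOURCE A (Python) =====
-- def _rk_slide(
--     walls: set[tuple[int, int]],
--     gw: int,
--     gh: int,
--     goals: set[tuple[int, int]],
--     x: int,
--     y: int,
--     dx: int,
--     dy: int,
-- ) -> tuple[tuple[int, int], bool]:
--     """Rook slide; True if the path visits a goal (matches rk01 win-on-path)."""
--     while True:
--         nx, ny = x + dx, y + dy
--         if not (0 <= nx < gw and 0 <= ny < gh) or (nx, ny) in walls:
--             return (x, y), (x, y) in goals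
--         x, y = nx, ny
--         if (x, y) in goals:
--             return (x, y), True
-- ===== SOURCE B (Python) =====
-- def _rk_slide(walls, gw, gh, goals, x, y, dx, dy):
--     # Two-phase: slide all the way to the wall collecting the path, then scan
--     # the path once for the first goal.
--     path = []
--     cx, cy = x, y
--     while 0 <= cx + dx < gw and 0 <= cy + dy < gh and (cx + dx, cy + dy) not in walls:
--         cx, cy = cx + dx, cy + dy
--         path.append((cx, cy))
--     if not path:
--         return (x, y), (x, y) in goals
--     for cell in path:
--         if cell in goals:
--             return cell, True
--     return (cx, cy), False
-- ===== Notes on version B (the rewrite author's own statement) =====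
-- stated objective: alternative
-- what changed: B slides in two phases: first it collects the whole path to the wall ignoring goals, then it scans that path once for the first goal, whereas A tests each cell for a goal inside the slide loop and early-returns.
import Mathlib
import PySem

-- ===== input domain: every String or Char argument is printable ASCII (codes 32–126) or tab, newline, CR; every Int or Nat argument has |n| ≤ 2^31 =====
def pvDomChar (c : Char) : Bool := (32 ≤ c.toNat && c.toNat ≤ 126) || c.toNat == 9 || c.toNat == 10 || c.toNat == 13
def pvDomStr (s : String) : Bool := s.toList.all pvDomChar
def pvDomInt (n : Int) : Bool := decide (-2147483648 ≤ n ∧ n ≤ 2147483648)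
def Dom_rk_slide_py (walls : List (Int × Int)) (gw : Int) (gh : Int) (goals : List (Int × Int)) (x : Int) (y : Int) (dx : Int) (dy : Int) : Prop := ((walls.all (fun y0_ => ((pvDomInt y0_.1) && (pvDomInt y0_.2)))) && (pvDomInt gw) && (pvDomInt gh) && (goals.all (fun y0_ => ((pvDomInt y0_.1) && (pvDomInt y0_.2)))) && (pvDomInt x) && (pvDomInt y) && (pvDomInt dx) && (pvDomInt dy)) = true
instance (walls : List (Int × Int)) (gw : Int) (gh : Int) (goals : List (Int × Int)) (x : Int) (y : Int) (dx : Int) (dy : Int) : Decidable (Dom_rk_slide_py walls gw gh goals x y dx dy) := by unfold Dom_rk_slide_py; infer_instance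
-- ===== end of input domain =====

-- B restructures A's single slide loop (goal test inline, early return) into two phases:
-- collect the full path to the wall, then one scan of the path for the first goal
-- (objective: alternative decomposition, not faster).
-- Both loops are fueled; the fuel gw.natAbs + gh.natAbs + 1 is sufficient on Pre_.

-- ===== PORT A =====
def rkLoopA (walls : List (Int × Int)) (gw gh : Int) (goals : List (Int × Int)) (dx dy : Int) : Nat → Int → Int → (Int × Int) × Bool
  | 0, x, y => ((x, y), decide ((x, y) ∈ goals))
  | fuel + 1, x, y =>
    let nx := x + dx
    let ny := y + dy
    if ¬(0 ≤ nx ∧ nx < gw ∧ 0 ≤ ny ∧ ny < gh) ∨ (nx, ny) ∈ walls then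
      ((x, y), decide ((x, y) ∈ goals))
    else if (nx, ny) ∈ goals then
      ((nx, ny), true)
    else
      rkLoopA walls gw gh goals dx dy fuel nx ny

def rk_slide_py (walls : List (Int × Int)) (gw : Int) (gh : Int) (goals : List (Int × Int)) (x : Int) (y : Int) (dx : Int) (dy : Int) : (Int × Int) × Bool :=
  rkLoopA walls gw gh goals dx dy (gw.natAbs + gh.natAbs + 1) x y

-- ===== PORT B =====
-- phase 1: the wall-slide loop; returns (path of entered cells, endpoint)
def rkPathB (walls : List (Int × Int)) (gw gh dx dy : Int) : Nat → Int → Int → List (Int × Int) × (Int × Int)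
  | 0, cx, cy => ([], (cx, cy))
  | fuel + 1, cx, cy =>
    if 0 ≤ cx + dx ∧ cx + dx < gw ∧ 0 ≤ cy + dy ∧ cy + dy < gh ∧ (cx + dx, cy + dy) ∉ walls then
      let r := rkPathB walls gw gh dx dy fuel (cx + dx) (cy + dy)
      ((cx + dx, cy + dy) :: r.1, r.2)
    else
      ([], (cx, cy))

-- phase 2: first cell of the path that is a goal
def rkFirstGoal (goals : List (Int × Int)) : List (Int × Int) → Option (Int × Int)
  | [] => none
  | c :: rest => if c ∈ goals then some c else rkFirstGoal goals rest

def rk_slide_py_alt (walls : List (Int × Int)) (gw : Int) (gh : Int) (goals : List (Int × Int)) (x : Int) (y : Int) (dx : Int) (dy : Int) : (Int × Int) × Bool :=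
  let r := rkPathB walls gw gh dx dy (gw.natAbs + gh.natAbs + 1) x y
  if r.1.isEmpty then ((x, y), decide ((x, y) ∈ goals))
  else
    match rkFirstGoal goals r.1 with
    | some c => (c, true)
    | none => (r.2, false)

-- ===== PRECONDITION & SPEC =====
-- Pre_ excludes the zero-direction inputs whose start cell is in-bounds and not a wall:
-- there A loops forever unless the start is a goal, and B's wall-slide loop diverges even then.
def Pre_rk_slide_py (walls : List (Int × Int)) (gw : Int) (gh : Int) (goals : List (Int × Int)) (x : Int) (y : Int) (dx : Int) (dy : Int) : Prop :=
  ¬(dx = 0 ∧ dy = 0 ∧ 0 ≤ x ∧ x < gw ∧ 0 ≤ y ∧ y < gh ∧ (x, y) ∉ walls)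
instance (walls : List (Int × Int)) (gw : Int) (gh : Int) (goals : List (Int × Int)) (x : Int) (y : Int) (dx : Int) (dy : Int) : Decidable (Pre_rk_slide_py walls gw gh goals x y dx dy) := by unfold Pre_rk_slide_py; infer_instance

def pvWitness_rk_slide_py : (List (Int × Int)) × Int × Int × (List (Int × Int)) × Int × Int × Int × Int :=
  ([(2, 0)], 4, 1, [(1, 0)], 0, 0, 1, 0)

def Spec_rk_slide_py (walls : List (Int × Int)) (gw : Int) (gh : Int) (goals : List (Int × Int)) (x : Int) (y : Int) (dx : Int) (dy : Int) (out : (Int × Int) × Bool) : Prop := out = rk_slide_py_alt walls gw gh goals x y dx dy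
instance (walls : List (Int × Int)) (gw : Int) (gh : Int) (goals : List (Int × Int)) (x : Int) (y : Int) (dx : Int) (dy : Int) (out : (Int × Int) × Bool) : Decidable (Spec_rk_slide_py walls gw gh goals x y dx dy out) := by unfold Spec_rk_slide_py; infer_instance

-- ===== CLAIM (what is proved, stated in full; the proofs are below) =====
def Claim_equal_rk_slide_py : Prop := ∀ (walls : List (Int × Int)) (gw : Int) (gh : Int) (goals : List (Int × Int)) (x : Int) (y : Int) (dx : Int) (dy : Int), Dom_rk_slide_py walls gw gh goals x y dx dy → Pre_rk_slide_py walls gw gh goals x y dx dy → Spec_rk_slide_py walls gw gh goals x y dx dy (rk_slide_py walls gw gh goals x y dx dy)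

-- ===== LEMMAS AND PROOFS =====

-- B's post-processing of the fueled path, for an arbitrary fuel (the alt body abstracted over fuel)
def rkAltProcess (walls : List (Int × Int)) (gw gh : Int) (goals : List (Int × Int)) (dx dy : Int) (fuel : Nat) (x y : Int) : (Int × Int) × Bool :=
  let r := rkPathB walls gw gh dx dy fuel x y
  if r.1.isEmpty then ((x, y), decide ((x, y) ∈ goals))
  else
    match rkFirstGoal goals r.1 with
    | some c => (c, true)
    | none => (r.2, false)

lemma rkPathB_nil_snd (walls : List (Int × Int)) (gw gh dx dy : Int) :
    ∀ (fuel : Nat) (cx cy : Int), (rkPathB walls gw gh dx dy fuel cx cy).1 = [] →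
      (rkPathB walls gw gh dx dy fuel cx cy).2 = (cx, cy) := by
  intro fuel cx cy h
  cases fuel with
  | zero => simp [rkPathB]
  | succ n =>
    simp only [rkPathB] at h ⊢
    split at h
    · simp at h
    · rename_i hc
      simp [hc]

lemma rkLoopA_eq_alt (walls : List (Int × Int)) (gw gh : Int) (goals : List (Int × Int)) (dx dy : Int) :
    ∀ (fuel : Nat) (x y : Int),
      rkLoopA walls gw gh goals dx dy fuel x y = rkAltProcess walls gw gh goals dx dy fuel x y := by
  intro fuel
  induction fuel with
  | zero => intro x y; simp [rkLoopA, rkAltProcess, rkPathB]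
  | succ n ih =>
    intro x y
    by_cases hstep : 0 ≤ x + dx ∧ x + dx < gw ∧ 0 ≤ y + dy ∧ y + dy < gh ∧ (x + dx, y + dy) ∉ walls
    · -- the rook moves
      have hA : ¬(¬(0 ≤ x + dx ∧ x + dx < gw ∧ 0 ≤ y + dy ∧ y + dy < gh) ∨ (x + dx, y + dy) ∈ walls) := by
        tauto
      by_cases hg : (x + dx, y + dy) ∈ goals
      · simp [rkLoopA, rkAltProcess, rkPathB, hstep, hg, rkFirstGoal]
      · -- not a goal: A recurses; B skips the first path cell
        have hL : rkLoopA walls gw gh goals dx dy (n + 1) x y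
            = rkLoopA walls gw gh goals dx dy n (x + dx) (y + dy) := by
          rw [rkLoopA]
          split_ifs
          rfl
        rw [hL, ih]
        unfold rkAltProcess
        rw [rkPathB, if_pos hstep]
        simp only [List.isEmpty_cons, Bool.false_eq_true, if_false, rkFirstGoal, if_neg hg]
        cases hrest : (rkPathB walls gw gh dx dy n (x + dx) (y + dy)).1 with
        | nil =>
          have hsnd := rkPathB_nil_snd walls gw gh dx dy n (x + dx) (y + dy) hrest
          simp [rkFirstGoal, hsnd, hg]
        | cons c t =>
          simp
    · -- blocked: wall or out of bounds
      have hA : ¬(0 ≤ x + dx ∧ x + dx < gw ∧ 0 ≤ y + dy ∧ y + dy < gh) ∨ (x + dx, y + dy) ∈ walls := by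
        tauto
      have hL : rkLoopA walls gw gh goals dx dy (n + 1) x y
          = ((x, y), decide ((x, y) ∈ goals)) := by
        rw [rkLoopA]
        split_ifs
        rfl
      rw [hL]
      unfold rkAltProcess
      rw [rkPathB, if_neg hstep]
      simp

-- ===== VERDICT (by name: the statement is the Claim_ definition above) =====
theorem rk_slide_py_spec : Claim_equal_rk_slide_py := by
  intro walls gw gh goals x y dx dy _ _
  unfold Spec_rk_slide_py rk_slide_py rk_slide_py_alt
  exact rkLoopA_eq_alt walls gw gh goals dx dy (gw.natAbs + gh.natAbs + 1) x y
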